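-- pv_equiv track=rewrite | github.com/henry-czh/uvs_smt | readConfiguration.py | mergeTreeDepend
-- ===== SOURCE A (Python) =====
-- def mergeTreeDepend(current_cfgs,item,tree_depend_dict,new_depend_dict,multi_depend_dict,cfg_dict):
--     if item in tree_depend_dict:
--         if 'G' in cfg_dict[tree_depend_dict[item]]['options']:
--             if current_cfgs[tree_depend_dict[item]] not in ['D','G']:
--                 multi_depend_dict[tree_depend_dict[item]] = ['D','G']
--         else:
--             if current_cfgs[tree_depend_dict[item]] not in ['D']:
--                 new_depend_dict[tree_depend_dict[item]] = 'D'
--         sub_item = tree_depend_dict[item]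
--         del tree_depend_dict[item]
--         mergeTreeDepend(current_cfgs,sub_item,tree_depend_dict,new_depend_dict,multi_depend_dict,cfg_dict)
--     return new_depend_dict,multi_depend_dict
-- ===== SOURCE B (Python) =====
-- def mergeTreeDepend(current_cfgs,item,tree_depend_dict,new_depend_dict,multi_depend_dict,cfg_dict):
--     # phase 1: pop the whole dependency chain out of tree_depend_dict
--     chain = []
--     while item in tree_depend_dict:
--         item = tree_depend_dict.pop(item)
--         chain.append(item)
--     # phase 2: apply the D/G propagation to every key of the chain
--     for key in chain:
--         if 'G' in cfg_dict[key]['options']: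
--             if current_cfgs[key] not in ('D', 'G'):
--                 multi_depend_dict[key] = ['D', 'G']
--         elif current_cfgs[key] != 'D':
--             new_depend_dict[key] = 'D'
--     return new_depend_dict, multi_depend_dict
-- ===== Notes on version B (the rewrite author's own statement) =====
-- stated objective: alternative
-- what changed: Replaces the recursion that interleaves following the dependency chain with dict updates by a two-phase version: first pop the whole chain out of tree_depend_dict into a list, then apply the D/G updates in one pass over that list.
import Mathlib
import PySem

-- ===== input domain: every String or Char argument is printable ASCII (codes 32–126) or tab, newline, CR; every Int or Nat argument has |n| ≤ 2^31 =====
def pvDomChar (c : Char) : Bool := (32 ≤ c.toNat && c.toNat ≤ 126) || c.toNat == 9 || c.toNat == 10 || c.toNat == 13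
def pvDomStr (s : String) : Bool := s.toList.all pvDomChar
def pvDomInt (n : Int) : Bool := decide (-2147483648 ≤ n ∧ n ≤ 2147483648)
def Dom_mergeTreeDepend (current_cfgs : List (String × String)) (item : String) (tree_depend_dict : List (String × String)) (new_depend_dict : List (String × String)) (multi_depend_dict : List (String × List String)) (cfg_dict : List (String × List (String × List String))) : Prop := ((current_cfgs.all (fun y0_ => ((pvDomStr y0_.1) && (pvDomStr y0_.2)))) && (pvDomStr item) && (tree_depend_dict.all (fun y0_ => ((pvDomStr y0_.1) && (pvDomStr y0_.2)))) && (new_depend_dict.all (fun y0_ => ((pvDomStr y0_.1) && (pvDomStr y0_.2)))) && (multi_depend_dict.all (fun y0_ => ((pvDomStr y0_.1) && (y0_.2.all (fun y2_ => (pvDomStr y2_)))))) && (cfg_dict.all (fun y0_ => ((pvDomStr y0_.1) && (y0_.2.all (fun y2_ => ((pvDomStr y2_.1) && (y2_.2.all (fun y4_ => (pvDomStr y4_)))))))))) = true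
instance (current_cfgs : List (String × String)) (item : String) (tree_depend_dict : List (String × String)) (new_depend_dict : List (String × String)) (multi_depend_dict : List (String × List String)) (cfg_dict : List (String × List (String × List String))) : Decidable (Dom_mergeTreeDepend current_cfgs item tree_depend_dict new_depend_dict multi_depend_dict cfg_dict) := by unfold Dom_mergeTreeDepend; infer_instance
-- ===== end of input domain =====

-- B replaces A's recursion (which interleaves following the dependency chain with dict
-- updates) by two phases: pop the whole chain into a list, then apply the updates in one
-- pass; same cost, equal return values on Pre_. Both Pythons mutate their dict arguments
-- in place (identically inside Pre_); the equivalence proved here is about the return value.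

-- dict[k] first-match lookup is List.lookup; the two helpers below are Python's
-- `d[k] = v` (overwrite in place, else append) and `del d[k]` (remove first match).
def alInsert {ν : Type} (l : List (String × ν)) (k : String) (v : ν) : List (String × ν) :=
  match l with
  | [] => [(k, v)]
  | (k', v') :: rest => if k' = k then (k, v) :: rest else (k', v') :: alInsert rest k v

def alErase {ν : Type} (l : List (String × ν)) (k : String) : List (String × ν) :=
  match l with
  | [] => []
  | (k', v') :: rest => if k' = k then rest else (k', v') :: alErase rest k

-- used by both ports' termination and by Pre_'s chainVals
theorem alErase_length_lt {ν : Type} (l : List (String × ν)) (k : String)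
    (h : (List.lookup k l).isSome) : (alErase l k).length < l.length := by
  induction l with
  | nil => simp [List.lookup] at h
  | cons p rest ih =>
    obtain ⟨k', v'⟩ := p
    by_cases hk : k' = k
    · simp [alErase, hk]
    · have hne : (k == k') = false := beq_eq_false_iff_ne.mpr (Ne.symm hk)
      simp only [alErase, hk, if_false, List.length_cons]
      have := ih (by simpa [List.lookup, hne] using h)
      omega

-- ===== PORT A =====
def mergeTreeDepend (current_cfgs : List (String × String)) (item : String) (tree_depend_dict : List (String × String)) (new_depend_dict : List (String × String)) (multi_depend_dict : List (String × List String)) (cfg_dict : List (String × List (String × List String))) : (List (String × String)) × (List (String × List String)) :=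
  match h : List.lookup item tree_depend_dict with
  | some key =>
    -- 'G' in cfg_dict[tree_depend_dict[item]]['options']  (missing keys raise in Python: outside Pre_)
    let opts := (List.lookup "options" ((List.lookup key cfg_dict).getD [])).getD []
    if "G" ∈ opts then
      let md' := if (List.lookup key current_cfgs).getD "" ∈ (["D", "G"] : List String)
                 then multi_depend_dict else alInsert multi_depend_dict key ["D", "G"]
      mergeTreeDepend current_cfgs key (alErase tree_depend_dict item) new_depend_dict md' cfg_dict
    else
      let nd' := if (List.lookup key current_cfgs).getD "" ∈ (["D"] : List String)
                 then new_depend_dict else alInsert new_depend_dict key "D"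
      mergeTreeDepend current_cfgs key (alErase tree_depend_dict item) nd' multi_depend_dict cfg_dict
  | none => (new_depend_dict, multi_depend_dict)
termination_by tree_depend_dict.length
decreasing_by
  all_goals exact alErase_length_lt _ _ (by simp [h])

-- ===== PORT B =====
-- phase 1 of Source B: the while loop popping the chain (returns the chain and the popped dict)
def popChain (item : String) (tree_depend_dict : List (String × String)) : List String × List (String × String) :=
  match h : List.lookup item tree_depend_dict with
  | some nxt =>
    let p := popChain nxt (alErase tree_depend_dict item)
    (nxt :: p.1, p.2)
  | none => ([], tree_depend_dict)
termination_by tree_depend_dict.length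
decreasing_by exact alErase_length_lt _ _ (by simp [h])

-- phase 2 of Source B: one for-loop step over the chain, acting on the pair (new_depend_dict, multi_depend_dict)
def chainStep (current_cfgs : List (String × String)) (cfg_dict : List (String × List (String × List String))) (acc : (List (String × String)) × (List (String × List String))) (key : String) : (List (String × String)) × (List (String × List String)) :=
  let opts := (List.lookup "options" ((List.lookup key cfg_dict).getD [])).getD []
  if "G" ∈ opts then
    if (List.lookup key current_cfgs).getD "" ∈ (["D", "G"] : List String) then acc
    else (acc.1, alInsert acc.2 key ["D", "G"])
  else
    if (List.lookup key current_cfgs).getD "" ≠ "D" then (alInsert acc.1 key "D", acc.2)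
    else acc

def mergeTreeDepend_alt (current_cfgs : List (String × String)) (item : String) (tree_depend_dict : List (String × String)) (new_depend_dict : List (String × String)) (multi_depend_dict : List (String × List String)) (cfg_dict : List (String × List (String × List String))) : (List (String × String)) × (List (String × List String)) :=
  let chain := (popChain item tree_depend_dict).1
  chain.foldl (chainStep current_cfgs cfg_dict) (new_depend_dict, multi_depend_dict)

-- ===== PRECONDITION & SPEC =====
-- chainVals describes the INPUT shape Pre_ talks about, not either port's computation: it
-- lists exactly the keys on the dependency chain followed from item (each link removed after
-- use, so the chain is finite and at most tree_depend_dict.length long — the structural fuel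
-- below is that exact bound, not a simulation of A, which also updates three other dicts).
def chainValsFuel (fuel : Nat) (item : String) (tree_depend_dict : List (String × String)) : List String :=
  match fuel with
  | 0 => []
  | n + 1 =>
    match List.lookup item tree_depend_dict with
    | some nxt => nxt :: chainValsFuel n nxt (alErase tree_depend_dict item)
    | none => []

def chainVals (item : String) (tree_depend_dict : List (String × String)) : List String :=
  chainValsFuel tree_depend_dict.length item tree_depend_dict

-- Pre_ excludes exactly the inputs on which Python A raises KeyError: some key on the
-- dependency chain actually followed from item is missing from cfg_dict, lacks an
-- 'options' entry, or is missing from current_cfgs. On every other input A returns.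
def Pre_mergeTreeDepend (current_cfgs : List (String × String)) (item : String) (tree_depend_dict : List (String × String)) (new_depend_dict : List (String × String)) (multi_depend_dict : List (String × List String)) (cfg_dict : List (String × List (String × List String))) : Prop :=
  ∀ k ∈ chainVals item tree_depend_dict,
    (List.lookup k cfg_dict).isSome = true ∧
    (List.lookup "options" ((List.lookup k cfg_dict).getD [])).isSome = true ∧
    (List.lookup k current_cfgs).isSome = true
instance (current_cfgs : List (String × String)) (item : String) (tree_depend_dict : List (String × String)) (new_depend_dict : List (String × String)) (multi_depend_dict : List (String × List String)) (cfg_dict : List (String × List (String × List String))) : Decidable (Pre_mergeTreeDepend current_cfgs item tree_depend_dict new_depend_dict multi_depend_dict cfg_dict) := by unfold Pre_mergeTreeDepend; infer_instance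

def pvWitness_mergeTreeDepend : (List (String × String)) × String × (List (String × String)) × (List (String × String)) × (List (String × List String)) × (List (String × List (String × List String))) :=
  ([("b", "X")], "a", [("a", "b")], [], [], [("b", [("options", [])])])

def Spec_mergeTreeDepend (current_cfgs : List (String × String)) (item : String) (tree_depend_dict : List (String × String)) (new_depend_dict : List (String × String)) (multi_depend_dict : List (String × List String)) (cfg_dict : List (String × List (String × List String))) (out : (List (String × String)) × (List (String × List String))) : Prop := out = mergeTreeDepend_alt current_cfgs item tree_depend_dict new_depend_dict multi_depend_dict cfg_dict
instance (current_cfgs : List (String × String)) (item : String) (tree_depend_dict : List (String × String)) (new_depend_dict : List (String × String)) (multi_depend_dict : List (String × List String)) (cfg_dict : List (String × List (String × List String))) (out : (List (String × String)) × (List (String × List String))) : Decidable (Spec_mergeTreeDepend current_cfgs item tree_depend_dict new_depend_dict multi_depend_dict cfg_dict out) := by unfold Spec_mergeTreeDepend; infer_instance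

-- ===== CLAIM (what is proved, stated in full; the proofs are below) =====
def Claim_equal_mergeTreeDepend : Prop := ∀ (current_cfgs : List (String × String)) (item : String) (tree_depend_dict : List (String × String)) (new_depend_dict : List (String × String)) (multi_depend_dict : List (String × List String)) (cfg_dict : List (String × List (String × List String))), Dom_mergeTreeDepend current_cfgs item tree_depend_dict new_depend_dict multi_depend_dict cfg_dict → Pre_mergeTreeDepend current_cfgs item tree_depend_dict new_depend_dict multi_depend_dict cfg_dict → Spec_mergeTreeDepend current_cfgs item tree_depend_dict new_depend_dict multi_depend_dict cfg_dict (mergeTreeDepend current_cfgs item tree_depend_dict new_depend_dict multi_depend_dict cfg_dict)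

-- ===== LEMMAS AND PROOFS =====

-- A's recursion computes the fold of chainStep over the chain popped by B (for ALL inputs,
-- so the Pre_ hypothesis of the claim is not even needed for equality of the return values)
theorem merge_eq_fold (current_cfgs : List (String × String)) (cfg_dict : List (String × List (String × List String))) (item : String) (tree_depend_dict : List (String × String)) (new_depend_dict : List (String × String)) (multi_depend_dict : List (String × List String)) :
    mergeTreeDepend current_cfgs item tree_depend_dict new_depend_dict multi_depend_dict cfg_dict
      = (popChain item tree_depend_dict).1.foldl (chainStep current_cfgs cfg_dict) (new_depend_dict, multi_depend_dict) := by
  induction hn : tree_depend_dict.length using Nat.strong_induction_on generalizing item tree_depend_dict new_depend_dict multi_depend_dict with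
  | _ n ih =>
  rw [mergeTreeDepend, popChain]
  match h : List.lookup item tree_depend_dict with
  | none => simp
  | some key =>
    simp only [List.foldl_cons]
    have hlt : (alErase tree_depend_dict item).length < n := by
      rw [← hn]; exact alErase_length_lt _ _ (by simp [h])
    by_cases hg : "G" ∈ (List.lookup "options" ((List.lookup key cfg_dict).getD [])).getD []
    · simp only [hg, if_true]
      rw [ih _ hlt key _ _ _ rfl]
      by_cases hc : (List.lookup key current_cfgs).getD "" ∈ (["D", "G"] : List String) <;>
        simp [chainStep, hg, hc]
    · simp only [hg, if_false]
      rw [ih _ hlt key _ _ _ rfl]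
      by_cases hc : (List.lookup key current_cfgs).getD "" ∈ (["D"] : List String) <;>
        simp_all [chainStep]

-- ===== VERDICT (by name: the statement is the Claim_ definition above) =====
theorem mergeTreeDepend_spec : Claim_equal_mergeTreeDepend := by
  intro current_cfgs item tree_depend_dict new_depend_dict multi_depend_dict cfg_dict _ _
  unfold Spec_mergeTreeDepend mergeTreeDepend_alt
  exact merge_eq_fold current_cfgs cfg_dict item tree_depend_dict new_depend_dict multi_depend_dict
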